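-- pv_equiv track=rewrite | github.com/kouSeek/DSA | matrix_rotation.py | mat_rotate
-- ===== SOURCE A (Python) =====
-- def mat_rotate(mat, num):
--     def rotate(mat):
--         r = len(mat)
--         c = len(mat[0])
--
--         temp = [ [0 for i in range(c)] for j in range(r)]
--         top, left, right, bottom = 0, 0, c-1, r-1
--         while left<right and top<bottom:
--             ## top
--             for i in range(left, right):
--                 temp[top][i] = mat[top][i+1]
--             ## right
--             for i in range(top, bottom):
--                 temp[i][right] = mat[i+1][right]
--             ##bottom
--             for i in range(right, left, -1):
--                 temp[bottom][i] = mat[bottom][i-1]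
--             ## left
--             for i in range(bottom, top, -1):
--                 temp[i][left] = mat[i-1][left]
--
--             left += 1
--             top += 1
--             right -= 1
--             bottom -= 1
--         return temp
--
--
--     for i in range(num):
--         mat = rotate(mat)
--
--     return mat
-- ===== SOURCE B (Python) =====
-- def mat_rotate(mat, num):
--     if num <= 0:
--         return mat
--     r = len(mat)
--     c = len(mat[0])
--     res = [[0] * c for _ in range(r)]
--     d = 0
--     while d < c - 1 - d and d < r - 1 - d:
--         top, left, right, bottom = d, d, c - 1 - d, r - 1 - d
--         coords = (
--             [(top, j) for j in range(left, right)]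
--             + [(i, right) for i in range(top, bottom)]
--             + [(bottom, j) for j in range(right, left, -1)]
--             + [(i, left) for i in range(bottom, top, -1)]
--         )
--         vals = [mat[i][j] for i, j in coords]
--         k = num % len(vals)
--         rot = vals[k:] + vals[:k]
--         for (i, j), v in zip(coords, rot):
--             res[i][j] = v
--         d += 1
--     return res
-- ===== Notes on version B (the rewrite author's own statement) =====
-- stated objective: faster
-- what changed: A applies the one-step ring rotation num times (each pass rebuilding the whole matrix); B builds the result in a single pass, extracting each ring once and shifting it by num mod its length with one slice.
import Mathlib
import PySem

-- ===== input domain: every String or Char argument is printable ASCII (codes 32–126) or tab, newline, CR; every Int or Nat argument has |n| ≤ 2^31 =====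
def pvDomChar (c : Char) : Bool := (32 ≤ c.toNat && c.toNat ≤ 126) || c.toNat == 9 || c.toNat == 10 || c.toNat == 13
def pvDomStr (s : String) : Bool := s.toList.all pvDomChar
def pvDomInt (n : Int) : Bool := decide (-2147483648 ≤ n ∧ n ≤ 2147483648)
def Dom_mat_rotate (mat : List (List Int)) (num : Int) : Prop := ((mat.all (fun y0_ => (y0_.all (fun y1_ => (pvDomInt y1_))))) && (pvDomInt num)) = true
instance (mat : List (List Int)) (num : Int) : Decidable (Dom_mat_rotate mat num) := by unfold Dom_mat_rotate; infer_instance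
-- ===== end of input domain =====

-- B replaces A's num successive one-step ring rotations by a single pass that rotates each
-- ring by num mod its length (objective: faster when num is large). Return-value equivalence;
-- neither program mutates its argument.

-- shared primitives ------------------------------------------------------------
-- mat[i][j] read; every index either program reads is ≥ 0, and under Pre_mat_rotate it is in
-- range, so Python's negative-index wrap and IndexError are unreachable and the default 0 is
-- never returned on admitted inputs.
def pvGetCell (m : List (List Int)) (i j : Int) : Int := (m.getD i.toNat []).getD j.toNat 0
-- mat[i][j] = v write; both programs only write with 0 ≤ i < len(m), 0 ≤ j < len(row), where
-- List.modify/List.set are exactly Python's in-range assignment.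
def pvSet2 (m : List (List Int)) (i j : Int) (v : Int) : List (List Int) :=
  m.modify i.toNat (fun row => row.set j.toNat v)
-- [[0 for i in range(c)] for j in range(r)]
def pvZeroMat (r c : Nat) : List (List Int) :=
  (List.range r).map (fun _ => (List.range c).map (fun _ => (0 : Int)))

-- ===== PORT A =====
-- the while-loop of A's inner rotate(); the four for-loops are folds over the same ranges
def pvRotateLoop (m temp : List (List Int)) (top left right bottom : Int) : List (List Int) :=
  if _h : left < right ∧ top < bottom then
    let t1 := (PySem.List.pyRange left right 1).foldl
      (fun t i => pvSet2 t top i (pvGetCell m top (i + 1))) temp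
    let t2 := (PySem.List.pyRange top bottom 1).foldl
      (fun t i => pvSet2 t i right (pvGetCell m (i + 1) right)) t1
    let t3 := (PySem.List.pyRange right left (-1)).foldl
      (fun t i => pvSet2 t bottom i (pvGetCell m bottom (i - 1))) t2
    let t4 := (PySem.List.pyRange bottom top (-1)).foldl
      (fun t i => pvSet2 t i left (pvGetCell m (i - 1) left)) t3
    pvRotateLoop m t4 (top + 1) (left + 1) (right - 1) (bottom - 1)
  else temp
termination_by (right - left).toNat
decreasing_by omega

-- A's inner rotate(); in Python len(mat[0]) raises on mat = [] (excluded by Pre_), here getD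
def pvRotate (m : List (List Int)) : List (List Int) :=
  let r := m.length
  let c := (m.getD 0 []).length
  pvRotateLoop m (pvZeroMat r c) 0 0 ((c : Int) - 1) ((r : Int) - 1)

-- for i in range(num): mat = rotate(mat)  (range(num) is empty for num ≤ 0)
def mat_rotate (mat : List (List Int)) (num : Int) : List (List Int) :=
  (List.range num.toNat).foldl (fun m _ => pvRotate m) mat

-- ===== PORT B =====
-- the coords list of one ring, exactly B's four comprehensions
def pvRingCoords (top left right bottom : Int) : List (Int × Int) :=
  (PySem.List.pyRange left right 1).map (fun j => ((top, j) : Int × Int))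
  ++ (PySem.List.pyRange top bottom 1).map (fun i => ((i, right) : Int × Int))
  ++ (PySem.List.pyRange right left (-1)).map (fun j => ((bottom, j) : Int × Int))
  ++ (PySem.List.pyRange bottom top (-1)).map (fun i => ((i, left) : Int × Int))

-- B's while-loop over ring depth d; vals[k:] + vals[:k] is drop/take since 0 ≤ k ≤ len(vals)
def pvAltLoop (mat : List (List Int)) (num : Int) (res : List (List Int)) (r c d : Int) :
    List (List Int) :=
  if _h : d < c - 1 - d ∧ d < r - 1 - d then
    let coords := pvRingCoords d d (c - 1 - d) (r - 1 - d)
    let vals := coords.map (fun p => pvGetCell mat p.1 p.2)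
    let k := PySem.Int.mod num (vals.length : Int)
    let rot := vals.drop k.toNat ++ vals.take k.toNat
    let res' := (coords.zip rot).foldl (fun t pv => pvSet2 t pv.1.1 pv.1.2 pv.2) res
    pvAltLoop mat num res' r c (d + 1)
  else res
termination_by (c - 1 - d - d).toNat
decreasing_by omega

def mat_rotate_alt (mat : List (List Int)) (num : Int) : List (List Int) :=
  if num ≤ 0 then mat
  else
    let r := mat.length
    let c := (mat.getD 0 []).length
    pvAltLoop mat num (pvZeroMat r c) (r : Int) (c : Int) 0

-- ===== PRECONDITION & SPEC =====
-- Pre_ excludes exactly the inputs where Python A raises IndexError: with num ≥ 1 it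
-- evaluates mat[0] (so mat = [] raises) and, whenever the ring loop runs (len(mat[0]) ≥ 2),
-- it reads every row at column len(mat[0])-1, so a row shorter than row 0 raises.
def Pre_mat_rotate (mat : List (List Int)) (num : Int) : Prop :=
  0 < num → (mat ≠ [] ∧ (2 ≤ (mat.headD []).length →
    ∀ row ∈ mat, (mat.headD []).length ≤ row.length))
instance (mat : List (List Int)) (num : Int) : Decidable (Pre_mat_rotate mat num) := by
  unfold Pre_mat_rotate; infer_instance

def pvWitness_mat_rotate : List (List Int) × Int := ([[1, 2], [3, 4]], 1)

def Spec_mat_rotate (mat : List (List Int)) (num : Int) (out : List (List Int)) : Prop := out = mat_rotate_alt mat num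
instance (mat : List (List Int)) (num : Int) (out : List (List Int)) : Decidable (Spec_mat_rotate mat num out) := by unfold Spec_mat_rotate; infer_instance

-- ===== CLAIM (what is proved, stated in full; the proofs are below) =====
def Claim_equal_mat_rotate : Prop := ∀ (mat : List (List Int)) (num : Int), Dom_mat_rotate mat num → Pre_mat_rotate mat num → Spec_mat_rotate mat num (mat_rotate mat num)

-- ===== LEMMAS AND PROOFS =====

-- proof-side vocabulary
def pvWriteCells (m : List (List Int)) (ps : List ((Int × Int) × Int)) : List (List Int) :=
  ps.foldl (fun t pv => pvSet2 t pv.1.1 pv.1.2 pv.2) m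

def pvRingIdxs (r c : Int) (d : Int) : List Int :=
  if _h : d < c - 1 - d ∧ d < r - 1 - d then d :: pvRingIdxs r c (d + 1) else []
termination_by (c - 1 - d - d).toNat
decreasing_by omega

def pvCoords (r c d : Int) : List (Int × Int) := pvRingCoords d d (c - 1 - d) (r - 1 - d)

def pvVals (m : List (List Int)) (r c d : Int) : List Int :=
  (pvCoords r c d).map (fun p => pvGetCell m p.1 p.2)

def pvWriteRing (m0 : List (List Int)) (r c : Int) (n : Nat)
    (acc : List (List Int)) (d : Int) : List (List Int) :=
  pvWriteCells acc ((pvCoords r c d).zip ((pvVals m0 r c d).rotate n))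

def pvF (m0 : List (List Int)) (r c : Nat) (n : Nat) : List (List Int) :=
  (pvRingIdxs (r : Int) (c : Int) 0).foldl (pvWriteRing m0 (r : Int) (c : Int) n) (pvZeroMat r c)

def pvShape (m : List (List Int)) (r c : Nat) : Prop :=
  m.length = r ∧ ∀ j : Nat, j < r → (m.getD j []).length = c

-- ring index list -------------------------------------------------------------
lemma mem_pvRingIdxs {r c d e : Int} (h : e ∈ pvRingIdxs r c d) :
    d ≤ e ∧ e < c - 1 - e ∧ e < r - 1 - e := by
  suffices H : ∀ (k : Nat) (d : Int), (c - 1 - d - d).toNat ≤ k → e ∈ pvRingIdxs r c d →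
      d ≤ e ∧ e < c - 1 - e ∧ e < r - 1 - e from H _ d le_rfl h
  intro k
  induction k with
  | zero =>
    intro d hk hm
    rw [pvRingIdxs] at hm
    split_ifs at hm with hc
    · omega
    · simp at hm
  | succ k ih =>
    intro d hk hm
    rw [pvRingIdxs] at hm
    split_ifs at hm with hc
    · rcases List.mem_cons.mp hm with rfl | hm'
      · omega
      · have := ih (d + 1) (by omega) hm'
        omega
    · simp at hm

lemma nodup_pvRingIdxs (r c : Int) : ∀ d : Int, (pvRingIdxs r c d).Nodup := by
  suffices H : ∀ (k : Nat) (d : Int), (c - 1 - d - d).toNat ≤ k → (pvRingIdxs r c d).Nodup by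
    intro d; exact H _ d le_rfl
  intro k
  induction k with
  | zero =>
    intro d hk; rw [pvRingIdxs]; split_ifs with hc
    · omega
    · exact List.nodup_nil
  | succ k ih =>
    intro d hk; rw [pvRingIdxs]; split_ifs with hc
    · refine List.Nodup.cons (fun hm => ?_) (ih (d + 1) (by omega))
      have := mem_pvRingIdxs hm; omega
    · exact List.nodup_nil

-- membership in a ring ---------------------------------------------------------
lemma mem_pvRingCoords {t l rt bt : Int} {p : Int × Int} :
    p ∈ pvRingCoords t l rt bt ↔
      (p.1 = t ∧ l ≤ p.2 ∧ p.2 < rt) ∨ (p.2 = rt ∧ t ≤ p.1 ∧ p.1 < bt) ∨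
      (p.1 = bt ∧ l < p.2 ∧ p.2 ≤ rt) ∨ (p.2 = l ∧ t < p.1 ∧ p.1 ≤ bt) := by
  unfold pvRingCoords
  simp only [List.mem_append, List.mem_map, PySem.List.mem_pyRange_one,
    PySem.List.mem_pyRange_neg_one]
  constructor
  · rintro (((⟨j, hj, rfl⟩ | ⟨i, hi, rfl⟩) | ⟨j, hj, rfl⟩) | ⟨i, hi, rfl⟩)
    · exact Or.inl ⟨rfl, hj.1, hj.2⟩
    · exact Or.inr (Or.inl ⟨rfl, hi.1, hi.2⟩)
    · exact Or.inr (Or.inr (Or.inl ⟨rfl, hj.1, hj.2⟩))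
    · exact Or.inr (Or.inr (Or.inr ⟨rfl, hi.1, hi.2⟩))
  · obtain ⟨x, y⟩ := p
    rintro (⟨h1, h2, h3⟩ | ⟨h1, h2, h3⟩ | ⟨h1, h2, h3⟩ | ⟨h1, h2, h3⟩) <;>
      dsimp only at h1 h2 h3
    · exact Or.inl (Or.inl (Or.inl ⟨y, ⟨h2, h3⟩, by simp [h1]⟩))
    · exact Or.inl (Or.inl (Or.inr ⟨x, ⟨h2, h3⟩, by simp [h1]⟩))
    · exact Or.inl (Or.inr ⟨y, ⟨h2, h3⟩, by simp [h1]⟩)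
    · exact Or.inr ⟨x, ⟨h2, h3⟩, by simp [h1]⟩

lemma pvCoords_bounds {r c d : Int} (hd : d < c - 1 - d ∧ d < r - 1 - d)
    {p : Int × Int} (hp : p ∈ pvCoords r c d) :
    d ≤ p.1 ∧ d ≤ p.2 ∧ d ≤ r - 1 - p.1 ∧ d ≤ c - 1 - p.2 ∧
      (p.1 = d ∨ p.2 = d ∨ p.1 = r - 1 - d ∨ p.2 = c - 1 - d) := by
  rw [pvCoords, mem_pvRingCoords] at hp
  rcases hp with h | h | h | h <;> omega

lemma pvCoords_disjoint {r c d e : Int} (hd : d < c - 1 - d ∧ d < r - 1 - d)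
    (he : e < c - 1 - e ∧ e < r - 1 - e) (hne : d ≠ e)
    {p : Int × Int} (hp : p ∈ pvCoords r c d) : p ∉ pvCoords r c e := by
  intro hq
  obtain ⟨a1, a2, a3, a4, a5⟩ := pvCoords_bounds hd hp
  obtain ⟨b1, b2, b3, b4, b5⟩ := pvCoords_bounds he hq
  rcases a5 with h | h | h | h <;> rcases b5 with h' | h' | h' | h' <;> omega

lemma nodup_pvCoords {r c d : Int} (hd : d < c - 1 - d ∧ d < r - 1 - d) :
    (pvCoords r c d).Nodup := by
  rw [pvCoords, pvRingCoords]
  have hinj1 : ∀ a : Int, Function.Injective (fun j : Int => ((a, j) : Int × Int)) := by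
    intro a x y h; simpa using h
  have hinj2 : ∀ a : Int, Function.Injective (fun i : Int => ((i, a) : Int × Int)) := by
    intro a x y h; simpa using h
  have hneg : ∀ a b : Int, (PySem.List.pyRange a b (-1)).Nodup := by
    intro a b
    rw [PySem.List.pyRange_neg_one_eq_reverse]
    exact List.nodup_reverse.mpr (PySem.List.nodup_pyRange_one _ _)
  have dis : ∀ (s1 s2 : List (Int × Int)),
      (∀ q ∈ s1, ∀ q' ∈ s2, q ≠ q') → s1.Disjoint s2 := by
    intro s1 s2 h p h1 h2; exact h p h1 p h2 rfl
  refine List.Nodup.append (List.Nodup.append (List.Nodup.append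
      ((PySem.List.nodup_pyRange_one _ _).map (hinj1 _))
      ((PySem.List.nodup_pyRange_one _ _).map (hinj2 _)) (dis _ _ ?_))
      ((hneg _ _).map (hinj1 _)) (List.disjoint_append_left.mpr ⟨dis _ _ ?_, dis _ _ ?_⟩))
      ((hneg _ _).map (hinj2 _))
      (List.disjoint_append_left.mpr ⟨List.disjoint_append_left.mpr ⟨dis _ _ ?_, dis _ _ ?_⟩,
        dis _ _ ?_⟩) <;>
  · rintro ⟨x, y⟩ h1 ⟨x', y'⟩ h2
    simp only [List.mem_map, PySem.List.mem_pyRange_one, PySem.List.mem_pyRange_neg_one] at h1 h2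
    obtain ⟨u, hu, hu2⟩ := h1
    obtain ⟨v, hv, hv2⟩ := h2
    simp only [Prod.mk.injEq, ne_eq, not_and]
    simp only [Prod.mk.injEq] at hu2 hv2
    intro he1 he2
    omega

lemma pvCoords_inrange {r c : Nat} {d : Int} (hd0 : 0 ≤ d)
    (hd : d < (c : Int) - 1 - d ∧ d < (r : Int) - 1 - d) :
    ∀ p ∈ pvCoords (r : Int) (c : Int) d,
      0 ≤ p.1 ∧ p.1 < (r : Int) ∧ 0 ≤ p.2 ∧ p.2 < (c : Int) := by
  intro p hp
  obtain ⟨a1, a2, a3, a4, _⟩ := pvCoords_bounds hd hp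
  omega

-- cells -----------------------------------------------------------------------
lemma pvGetD_set_eq {row : List Int} {j : Nat} (v : Int) (h : j < row.length) :
    (row.set j v).getD j 0 = v := by simp [List.getD, h]

lemma pvGetD_set_ne {row : List Int} {j i : Nat} (v : Int) (h : j ≠ i) :
    (row.set i v).getD j 0 = row.getD j 0 := by
  simp [List.getD, List.getElem?_set_ne (by omega : i ≠ j)]

lemma pvGetD_modify_eq {m : List (List Int)} {i : Nat} (f : List Int → List Int)
    (h : i < m.length) : (m.modify i f).getD i [] = f (m.getD i []) := by
  simp only [List.getD_eq_getElem?_getD, List.getElem?_modify, List.getElem?_eq_getElem h]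
  simp

lemma pvGetD_modify_ne {m : List (List Int)} {i k : Nat} (f : List Int → List Int)
    (h : i ≠ k) : (m.modify i f).getD k [] = m.getD k [] := by
  simp only [List.getD_eq_getElem?_getD, List.getElem?_modify]
  cases hk : m[k]? <;> simp [h]

lemma pvGetCell_set2_self {m : List (List Int)} {r c : Nat} (hs : pvShape m r c)
    {i j : Int} (hi : 0 ≤ i) (hi' : i < (r : Int)) (hj : 0 ≤ j) (hj' : j < (c : Int))
    (v : Int) : pvGetCell (pvSet2 m i j v) i j = v := by
  obtain ⟨hl, hrow⟩ := hs
  have h1 : i.toNat < m.length := by omega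
  have h2 : j.toNat < (m.getD i.toNat []).length := by rw [hrow i.toNat (by omega)]; omega
  unfold pvGetCell pvSet2
  rw [pvGetD_modify_eq _ h1, pvGetD_set_eq _ h2]

lemma pvGetCell_set2_ne {m : List (List Int)} {i j i' j' : Int}
    (hi : 0 ≤ i) (hj : 0 ≤ j) (hi' : 0 ≤ i') (hj' : 0 ≤ j')
    (hne : (i, j) ≠ (i', j')) (v : Int) :
    pvGetCell (pvSet2 m i' j' v) i j = pvGetCell m i j := by
  unfold pvGetCell pvSet2
  by_cases hii : i'.toNat = i.toNat
  · have hjne : j.toNat ≠ j'.toNat := by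
      intro h; exact hne (by rw [Prod.ext_iff]; constructor <;> dsimp <;> omega)
    by_cases hlen : i.toNat < m.length
    · rw [hii, pvGetD_modify_eq _ hlen, pvGetD_set_ne _ hjne]
    · have e1 : (m.modify i'.toNat fun row => row.set j'.toNat v).getD i.toNat [] = [] :=
        List.getD_eq_default _ _ (by simpa using (by omega : m.length ≤ i.toNat))
      have e2 : m.getD i.toNat [] = [] := List.getD_eq_default _ _ (by omega)
      rw [e1, e2]
  · rw [pvGetD_modify_ne _ hii]

lemma pvShape_set2 {m : List (List Int)} {r c : Nat} (hs : pvShape m r c) (i j : Int) (v : Int) :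
    pvShape (pvSet2 m i j v) r c := by
  obtain ⟨hl, hrow⟩ := hs
  refine ⟨by simp [pvSet2, hl], ?_⟩
  intro k hk
  unfold pvSet2
  rw [List.getD, List.getElem?_modify]
  cases h : m[k]? with
  | none => exact absurd (List.getElem?_eq_none_iff.mp h) (by omega)
  | some row =>
    have : (m.getD k []).length = c := hrow k hk
    rw [List.getD, h] at this; simp at this
    by_cases hik : i.toNat = k <;> simp [hik, this]

lemma pvShape_writeCells {m : List (List Int)} {r c : Nat} (hs : pvShape m r c)
    (ps : List ((Int × Int) × Int)) : pvShape (pvWriteCells m ps) r c := by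
  induction ps generalizing m with
  | nil => exact hs
  | cons q qs ih => exact ih (pvShape_set2 hs _ _ _)

lemma pvShape_zeroMat (r c : Nat) : pvShape (pvZeroMat r c) r c := by
  refine ⟨by simp [pvZeroMat], ?_⟩
  intro j hj
  unfold pvZeroMat
  rw [List.getD, List.getElem?_map]
  simp [List.getElem?_range hj]

lemma pvGetCell_writeCells_notmem {m : List (List Int)} {ps : List ((Int × Int) × Int)}
    {p : Int × Int} (hp : 0 ≤ p.1 ∧ 0 ≤ p.2)
    (hq : ∀ q ∈ ps, (0 ≤ q.1.1 ∧ 0 ≤ q.1.2) ∧ q.1 ≠ p) :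
    pvGetCell (pvWriteCells m ps) p.1 p.2 = pvGetCell m p.1 p.2 := by
  induction ps generalizing m with
  | nil => rfl
  | cons q qs ih =>
    have hq0 := hq q (by simp)
    rw [pvWriteCells, List.foldl_cons, ← pvWriteCells,
      ih (fun x hx => hq x (by simp [hx])),
      pvGetCell_set2_ne hp.1 hp.2 hq0.1.1 hq0.1.2 (by
        intro h
        exact hq0.2 (by rw [Prod.ext_iff] at h ⊢; exact ⟨h.1.symm ▸ rfl, h.2.symm ▸ rfl⟩))]

lemma map_pvGetCell_writeCells {r c : Nat} :
    ∀ (coords : List (Int × Int)) (ws : List Int) (m : List (List Int)),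
    pvShape m r c → ws.length = coords.length → coords.Nodup →
    (∀ p ∈ coords, 0 ≤ p.1 ∧ p.1 < (r : Int) ∧ 0 ≤ p.2 ∧ p.2 < (c : Int)) →
    coords.map (fun p => pvGetCell (pvWriteCells m (coords.zip ws)) p.1 p.2) = ws := by
  intro coords
  induction coords with
  | nil => intro ws m _ hlen _ _; simp at hlen ⊢; omega
  | cons p ps ih =>
    intro ws m hs hlen hnd hin
    cases ws with
    | nil => simp at hlen
    | cons w ws' =>
      have hp := hin p (by simp)
      rw [List.zip_cons_cons, List.map_cons]
      have hstep : pvWriteCells m ((p, w) :: ps.zip ws') =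
          pvWriteCells (pvSet2 m p.1 p.2 w) (ps.zip ws') := rfl
      congr 1
      · rw [hstep]
        rw [pvGetCell_writeCells_notmem ⟨hp.1, hp.2.2.1⟩ ?_]
        · exact pvGetCell_set2_self hs hp.1 hp.2.1 hp.2.2.1 hp.2.2.2 w
        · rintro ⟨qc, qv⟩ hqmem
          have hqfst : qc ∈ ps := (List.of_mem_zip hqmem).1
          have hqin := hin qc (by simp [hqfst])
          exact ⟨⟨hqin.1, hqin.2.2.1⟩, fun h => (List.nodup_cons.mp hnd).1 (h ▸ hqfst)⟩
      · rw [hstep]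
        exact ih ws' _ (pvShape_set2 hs _ _ _) (by simpa using hlen)
          (List.nodup_cons.mp hnd).2 (fun q hq => hin q (by simp [hq]))

-- the rotate-by-one structure of one ring ---------------------------------------
lemma pvRange_map_succ (a b : Int) :
    (PySem.List.pyRange a b 1).map (fun x => x + 1) = PySem.List.pyRange (a + 1) (b + 1) 1 := by
  rw [PySem.List.pyRange_one, PySem.List.pyRange_one, List.map_map]
  have h : b + 1 - (a + 1) = b - a := by ring
  rw [h]
  apply List.map_congr_left
  intro k _
  simp only [Function.comp_apply]
  omega

lemma pvRange_map_pred (b a : Int) :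
    (PySem.List.pyRange b a (-1)).map (fun x => x - 1) =
      PySem.List.pyRange (b - 1) (a - 1) (-1) := by
  rw [PySem.List.pyRange_neg_one, PySem.List.pyRange_neg_one, List.map_map]
  have h : b - 1 - (a - 1) = b - a := by ring
  rw [h]
  apply List.map_congr_left
  intro k _
  simp only [Function.comp_apply]
  omega

lemma pvRange_neg_one_last (b a : Int) (h : a ≤ b) :
    PySem.List.pyRange b (a - 1) (-1) = PySem.List.pyRange b a (-1) ++ [a] := by
  rw [PySem.List.pyRange_neg_one_eq_reverse, PySem.List.pyRange_neg_one_eq_reverse]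
  have h1 : a - 1 + 1 = a := by ring
  rw [h1, PySem.List.pyRange_one_cons (by omega), List.reverse_cons]

lemma pvRingCoords_rotate_one {t l rt bt : Int} (h1 : l < rt) (h2 : t < bt) :
    (pvRingCoords t l rt bt).rotate 1 =
      (PySem.List.pyRange l rt 1).map (fun j => ((t, j + 1) : Int × Int))
      ++ (PySem.List.pyRange t bt 1).map (fun i => ((i + 1, rt) : Int × Int))
      ++ (PySem.List.pyRange rt l (-1)).map (fun j => ((bt, j - 1) : Int × Int))
      ++ (PySem.List.pyRange bt t (-1)).map (fun i => ((i - 1, l) : Int × Int)) := by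
  have f1 : (PySem.List.pyRange l rt 1).map (fun j => ((t, j + 1) : Int × Int)) =
      (PySem.List.pyRange (l + 1) rt 1).map (fun j => ((t, j) : Int × Int)) ++ [(t, rt)] := by
    have : (PySem.List.pyRange l rt 1).map (fun j => ((t, j + 1) : Int × Int)) =
        ((PySem.List.pyRange l rt 1).map (fun x => x + 1)).map (fun j => ((t, j) : Int × Int)) := by
      rw [List.map_map]; rfl
    rw [this, pvRange_map_succ, PySem.List.pyRange_one_succ_right (by omega), List.map_append]
    rfl
  have f2 : (PySem.List.pyRange t bt 1).map (fun i => ((i + 1, rt) : Int × Int)) =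
      (PySem.List.pyRange (t + 1) bt 1).map (fun i => ((i, rt) : Int × Int)) ++ [(bt, rt)] := by
    have : (PySem.List.pyRange t bt 1).map (fun i => ((i + 1, rt) : Int × Int)) =
        ((PySem.List.pyRange t bt 1).map (fun x => x + 1)).map (fun i => ((i, rt) : Int × Int)) := by
      rw [List.map_map]; rfl
    rw [this, pvRange_map_succ, PySem.List.pyRange_one_succ_right (by omega), List.map_append]
    rfl
  have f3 : (PySem.List.pyRange rt l (-1)).map (fun j => ((bt, j - 1) : Int × Int)) =
      (PySem.List.pyRange (rt - 1) l (-1)).map (fun j => ((bt, j) : Int × Int)) ++ [(bt, l)] := by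
    have : (PySem.List.pyRange rt l (-1)).map (fun j => ((bt, j - 1) : Int × Int)) =
        ((PySem.List.pyRange rt l (-1)).map (fun x => x - 1)).map
          (fun j => ((bt, j) : Int × Int)) := by
      rw [List.map_map]; rfl
    rw [this, pvRange_map_pred, pvRange_neg_one_last _ _ (by omega), List.map_append]
    rfl
  have f4 : (PySem.List.pyRange bt t (-1)).map (fun i => ((i - 1, l) : Int × Int)) =
      (PySem.List.pyRange (bt - 1) t (-1)).map (fun i => ((i, l) : Int × Int)) ++ [(t, l)] := by
    have : (PySem.List.pyRange bt t (-1)).map (fun i => ((i - 1, l) : Int × Int)) =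
        ((PySem.List.pyRange bt t (-1)).map (fun x => x - 1)).map
          (fun i => ((i, l) : Int × Int)) := by
      rw [List.map_map]; rfl
    rw [this, pvRange_map_pred, pvRange_neg_one_last _ _ (by omega), List.map_append]
    rfl
  rw [f1, f2, f3, f4, pvRingCoords,
    PySem.List.pyRange_one_cons h1, PySem.List.pyRange_one_cons h2,
    PySem.List.pyRange_neg_one_cons h1, PySem.List.pyRange_neg_one_cons h2]
  simp only [List.map_cons, List.cons_append, List.append_assoc]
  rw [List.rotate_cons_succ, List.rotate_zero]
  simp [List.append_assoc]

-- one iteration of A's while-loop body writes the 1-rotated ring ----------------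
lemma pvStepA_eq (m temp : List (List Int)) {t l rt bt : Int} (h1 : l < rt) (h2 : t < bt) :
    ((PySem.List.pyRange bt t (-1)).foldl (fun tp i => pvSet2 tp i l (pvGetCell m (i - 1) l))
      (((PySem.List.pyRange rt l (-1)).foldl (fun tp i => pvSet2 tp bt i (pvGetCell m bt (i - 1)))
        (((PySem.List.pyRange t bt 1).foldl (fun tp i => pvSet2 tp i rt (pvGetCell m (i + 1) rt))
          (((PySem.List.pyRange l rt 1).foldl (fun tp i => pvSet2 tp t i (pvGetCell m t (i + 1)))
            temp))))))) =
    pvWriteCells temp ((pvRingCoords t l rt bt).zip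
      (((pvRingCoords t l rt bt).map (fun p => pvGetCell m p.1 p.2)).rotate 1)) := by
  rw [← List.map_rotate, pvRingCoords_rotate_one h1 h2]
  conv_rhs => rw [pvRingCoords]
  simp only [List.map_append, List.map_map]
  rw [List.zip_append (by simp), List.zip_append (by simp), List.zip_append (by simp)]
  rw [List.zip_map', List.zip_map', List.zip_map', List.zip_map']
  unfold pvWriteCells
  rw [List.foldl_append, List.foldl_append, List.foldl_append]
  simp only [List.foldl_map]
  rfl

-- the two loops as folds over the ring index list -------------------------------
lemma pvRotateLoop_eq_foldl (m : List (List Int)) (r c : Int) :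
    ∀ (d : Int) (temp : List (List Int)),
    pvRotateLoop m temp d d (c - 1 - d) (r - 1 - d) =
      (pvRingIdxs r c d).foldl (pvWriteRing m r c 1) temp := by
  suffices H : ∀ (k : Nat) (d : Int) (temp : List (List Int)), (c - 1 - d - d).toNat ≤ k →
      pvRotateLoop m temp d d (c - 1 - d) (r - 1 - d) =
        (pvRingIdxs r c d).foldl (pvWriteRing m r c 1) temp by
    intro d temp; exact H _ d temp le_rfl
  intro k
  induction k with
  | zero =>
    intro d temp hk
    rw [pvRotateLoop, pvRingIdxs]
    split_ifs with hc
    · omega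
    · rfl
  | succ k ih =>
    intro d temp hk
    rw [pvRotateLoop, pvRingIdxs]
    split_ifs with hc
    · simp only [List.foldl_cons]
      have harg1 : c - 1 - d - 1 = c - 1 - (d + 1) := by ring
      have harg2 : r - 1 - d - 1 = r - 1 - (d + 1) := by ring
      rw [harg1, harg2, ih (d + 1) _ (by omega)]
      congr 1
      rw [pvWriteRing, pvCoords, pvVals, pvCoords]
      exact pvStepA_eq m temp hc.1 hc.2
    · rfl

lemma pvAltLoop_eq_foldl (mat : List (List Int)) (num : Int) (hnum : 1 ≤ num) (r c : Int) :
    ∀ (d : Int) (res : List (List Int)),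
    pvAltLoop mat num res r c d =
      (pvRingIdxs r c d).foldl (pvWriteRing mat r c num.toNat) res := by
  suffices H : ∀ (k : Nat) (d : Int) (res : List (List Int)), (c - 1 - d - d).toNat ≤ k →
      pvAltLoop mat num res r c d =
        (pvRingIdxs r c d).foldl (pvWriteRing mat r c num.toNat) res by
    intro d res; exact H _ d res le_rfl
  intro k
  induction k with
  | zero =>
    intro d res hk
    rw [pvAltLoop, pvRingIdxs]
    split_ifs with hc
    · omega
    · rfl
  | succ k ih =>
    intro d res hk
    rw [pvAltLoop, pvRingIdxs]
    split_ifs with hc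
    · simp only [List.foldl_cons]
      rw [ih (d + 1) _ (by omega)]
      congr 1
      -- the ring slice vals[k:] + vals[:k] is vals.rotate num.toNat
      rw [pvWriteRing, pvCoords, pvVals, pvCoords]
      set coords := pvRingCoords d d (c - 1 - d) (r - 1 - d) with hcoords
      set vals := coords.map (fun p => pvGetCell mat p.1 p.2) with hvals
      have hlenpos : 0 < vals.length := by
        rw [hvals, hcoords, pvRingCoords]
        simp only [List.length_map, List.length_append, PySem.List.length_pyRange_one]
        omega
      have hL : (0 : Int) < (vals.length : Int) := by exact_mod_cast hlenpos
      set kk := PySem.Int.mod num (vals.length : Int) with hkk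
      have hk0 : 0 ≤ kk := PySem.Int.mod_nonneg num hL
      have hk1 : kk < (vals.length : Int) := PySem.Int.mod_lt num hL
      have hke : kk = num % (vals.length : Int) := PySem.Int.mod_eq_emod_of_pos hL
      have hknat : kk.toNat = num.toNat % vals.length := by
        have : kk = ((num.toNat % vals.length : Nat) : Int) := by
          rw [hke]
          conv_lhs => rw [← Int.toNat_of_nonneg (by omega : (0 : Int) ≤ num)]
          push_cast
          rfl
        rw [this, Int.toNat_natCast]
      have hrot : vals.drop kk.toNat ++ vals.take kk.toNat = vals.rotate num.toNat := by
        rw [← List.rotate_eq_drop_append_take (by omega : kk.toNat ≤ vals.length), hknat,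
          List.rotate_mod]
      rw [hrot]
      rfl
    · rfl

-- read-back ---------------------------------------------------------------------
lemma pvVals_foldl_untouched {r c : Nat} {d : Int} (hd0 : 0 ≤ d)
    (hd : d < (c : Int) - 1 - d ∧ d < (r : Int) - 1 - d) (m0 : List (List Int)) (n : Nat) :
    ∀ (idxs : List Int) (base : List (List Int)),
    (∀ e ∈ idxs, (0 ≤ e ∧ e < (c : Int) - 1 - e ∧ e < (r : Int) - 1 - e) ∧ e ≠ d) →
    pvVals (idxs.foldl (pvWriteRing m0 (r : Int) (c : Int) n) base) (r : Int) (c : Int) d =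
      pvVals base (r : Int) (c : Int) d := by
  intro idxs
  induction idxs with
  | nil => intro base _; rfl
  | cons e es ih =>
    intro base hall
    have he := hall e (by simp)
    rw [List.foldl_cons, ih _ (fun x hx => hall x (by simp [hx]))]
    unfold pvVals
    apply List.map_congr_left
    intro p hp
    have hpin := pvCoords_inrange hd0 hd p hp
    rw [pvWriteRing]
    apply pvGetCell_writeCells_notmem ⟨hpin.1, hpin.2.2.1⟩
    rintro ⟨qc, qv⟩ hq
    have hqc : qc ∈ pvCoords (r : Int) (c : Int) e := (List.of_mem_zip hq).1
    have hqin := pvCoords_inrange he.1.1 he.1.2 qc hqc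
    refine ⟨⟨hqin.1, hqin.2.2.1⟩, fun hcontra => ?_⟩
    exact (pvCoords_disjoint hd he.1.2 (fun h => he.2 h.symm) hp) (hcontra ▸ hqc)

lemma pvVals_foldl_writeRing {r c : Nat} (m0 : List (List Int)) (n : Nat) :
    ∀ (idxs : List Int) (base : List (List Int)), pvShape base r c → idxs.Nodup →
    (∀ e ∈ idxs, 0 ≤ e ∧ e < (c : Int) - 1 - e ∧ e < (r : Int) - 1 - e) →
    ∀ d ∈ idxs,
      pvVals (idxs.foldl (pvWriteRing m0 (r : Int) (c : Int) n) base) (r : Int) (c : Int) d =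
        (pvVals m0 (r : Int) (c : Int) d).rotate n := by
  intro idxs
  induction idxs with
  | nil => intro base _ _ _ d hd; simp at hd
  | cons e es ih =>
    intro base hs hnd hall d hd
    obtain ⟨hnd1, hnd2⟩ := List.nodup_cons.mp hnd
    have he := hall e (by simp)
    rw [List.foldl_cons]
    rcases List.mem_cons.mp hd with rfl | hdes
    · rw [pvVals_foldl_untouched he.1 he.2 m0 n es _
        (fun x hx => ⟨hall x (by simp [hx]), fun hxd => hnd1 (hxd ▸ hx)⟩)]
      unfold pvWriteRing pvVals
      apply map_pvGetCell_writeCells _ _ _ hs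
      · simp
      · exact nodup_pvCoords he.2
      · exact pvCoords_inrange he.1 he.2
    · exact ih _ (pvShape_writeCells hs _) hnd2 (fun x hx => hall x (by simp [hx])) d hdes

lemma pvShape_foldl_writeRing {r c : Nat} (m0 : List (List Int)) (ri ci : Int) (n : Nat)
    (idxs : List Int) :
    ∀ base : List (List Int), pvShape base r c →
      pvShape (idxs.foldl (pvWriteRing m0 ri ci n) base) r c := by
  induction idxs with
  | nil => intro base hs; exact hs
  | cons _e es ih => intro base hs; exact ih _ (pvShape_writeCells hs _)

lemma pvShape_pvF (m0 : List (List Int)) (r c n : Nat) : pvShape (pvF m0 r c n) r c :=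
  pvShape_foldl_writeRing m0 _ _ n _ _ (pvShape_zeroMat r c)

lemma pvVals_pvF {r c : Nat} (m0 : List (List Int)) (n : Nat) {d : Int}
    (hd : d ∈ pvRingIdxs (r : Int) (c : Int) 0) :
    pvVals (pvF m0 r c n) (r : Int) (c : Int) d = (pvVals m0 (r : Int) (c : Int) d).rotate n :=
  pvVals_foldl_writeRing m0 n _ _ (pvShape_zeroMat r c) (nodup_pvRingIdxs _ _ 0)
    (fun e he => ⟨(mem_pvRingIdxs he).1, (mem_pvRingIdxs he).2⟩) d hd

-- A as ring-rotation ------------------------------------------------------------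
lemma pvRotate_eq (m : List (List Int)) :
    pvRotate m = (pvRingIdxs (m.length : Int) ((m.getD 0 []).length : Int) 0).foldl
      (pvWriteRing m (m.length : Int) ((m.getD 0 []).length : Int) 1)
      (pvZeroMat m.length (m.getD 0 []).length) := by
  have h := pvRotateLoop_eq_foldl m (m.length : Int) ((m.getD 0 []).length : Int) 0
    (pvZeroMat m.length (m.getD 0 []).length)
  norm_num at h
  exact h

lemma pvIter_eq_pvF (mat : List (List Int)) (hm : mat ≠ []) :
    ∀ n : Nat, 1 ≤ n →
    (List.range n).foldl (fun m _ => pvRotate m) mat =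
      pvF mat mat.length (mat.getD 0 []).length n := by
  intro n
  induction n with
  | zero => omega
  | succ k ih =>
    intro _
    by_cases hk : k = 0
    · subst hk
      have h1 : List.range 1 = [0] := rfl
      rw [h1, List.foldl_cons, List.foldl_nil, pvRotate_eq mat]
      rfl
    · rw [List.range_succ, List.foldl_append, List.foldl_cons, List.foldl_nil,
        ih (by omega)]
      set r := mat.length with hr
      set c := (mat.getD 0 []).length with hc
      have hshape := pvShape_pvF mat r c k
      have hlen : (pvF mat r c k).length = r := hshape.1
      have hrow0 : ((pvF mat r c k).getD 0 []).length = c := by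
        have hr1 : 0 < r := by rw [hr]; exact List.length_pos_iff.mpr hm
        exact hshape.2 0 hr1
      rw [pvRotate_eq (pvF mat r c k), hlen, hrow0]
      conv_rhs => rw [pvF]
      apply PySem.List.foldl_congr_mem
      intro acc e he
      rw [pvWriteRing, pvWriteRing, pvVals_pvF mat k he, List.rotate_rotate]

-- ===== VERDICT (by name: the statement is the Claim_ definition above) =====
theorem mat_rotate_spec : Claim_equal_mat_rotate := by
  intro mat num _ hpre
  unfold Spec_mat_rotate mat_rotate mat_rotate_alt
  by_cases hnum : num ≤ 0
  · rw [if_pos hnum, Int.toNat_of_nonpos hnum]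
    rfl
  · rw [if_neg hnum]
    have hnum1 : 1 ≤ num := by omega
    obtain ⟨hmat, -⟩ := hpre (by omega)
    rw [pvIter_eq_pvF mat hmat num.toNat (by omega)]
    rw [pvAltLoop_eq_foldl mat num hnum1 (mat.length : Int) ((mat.getD 0 []).length : Int) 0]
    rfl
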